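-- pv_equiv track=rewrite | github.com/Christian-Skovgaard/bilAbonnement | Frontend/Pages/subscriptions.py | joinLists
-- ===== SOURCE A (Python) =====
-- def joinLists(db1, db2, key1, key2):
--     result = []
--     for d1 in db1:
--         matched = False
--
--         for d2 in db2:
--             if d1.get(key1) == d2.get(key2):
--                 combined = {**d1, **d2}
--                 result.append(combined)
--                 matched = True
--
--         if not matched:
--             result.append(d1.copy())
--
--     return result
-- ===== SOURCE B (Python) =====
-- def joinLists(db1, db2, key1, key2):
--     # Index db2 by its join-key value once, then one lookup per row of db1.
--     index = {}
--     for d2 in db2: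
--         index.setdefault(d2.get(key2), []).append(d2)
--     result = []
--     for d1 in db1:
--         matches = index.get(d1.get(key1))
--         if matches:
--             for d2 in matches:
--                 result.append({**d1, **d2})
--         else:
--             result.append(d1.copy())
--     return result
-- ===== Notes on version B (the rewrite author's own statement) =====
-- stated objective: alternative
-- what changed: Replaced the nested scan of db2 for every row of db1 by a dictionary of db2 grouped by its join-key value built once, so each db1 row does a single lookup; on match-heavy inputs the output size dominates, so no speed-up is claimed.
import Mathlib
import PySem

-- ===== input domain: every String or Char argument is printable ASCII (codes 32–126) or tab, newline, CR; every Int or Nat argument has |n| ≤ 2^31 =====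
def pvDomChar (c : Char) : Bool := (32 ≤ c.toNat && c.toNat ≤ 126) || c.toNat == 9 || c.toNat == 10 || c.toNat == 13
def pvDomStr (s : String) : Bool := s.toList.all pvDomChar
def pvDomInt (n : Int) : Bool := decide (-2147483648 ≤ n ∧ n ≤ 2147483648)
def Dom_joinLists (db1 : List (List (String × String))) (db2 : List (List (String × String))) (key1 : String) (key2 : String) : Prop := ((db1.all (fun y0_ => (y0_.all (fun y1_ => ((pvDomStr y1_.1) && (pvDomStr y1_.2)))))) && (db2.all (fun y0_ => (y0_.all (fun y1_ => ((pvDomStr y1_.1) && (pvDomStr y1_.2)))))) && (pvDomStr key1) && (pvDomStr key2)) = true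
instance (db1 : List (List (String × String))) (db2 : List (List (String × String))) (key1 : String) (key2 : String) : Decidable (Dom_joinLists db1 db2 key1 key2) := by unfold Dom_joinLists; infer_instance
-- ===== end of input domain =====

-- B replaces A's nested scan of db2 per row of db1 by a dictionary of db2 grouped by
-- join-key value built once (objective: alternative algorithm). Return-value equivalence only.

-- d.get(k) on an inner dict (assoc list in insertion order)
def pyGetKV (d : List (String × String)) (k : String) : Option String :=
  (PySem.Dict.mk d).get? k

-- {**d1, **d2}
def pyMerge (d1 d2 : List (String × String)) : List (String × String) :=
  (d2.foldl (fun acc p => acc.insert p.1 p.2) (PySem.Dict.mk d1)).items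

-- ===== PORT A =====
def joinLists (db1 : List (List (String × String))) (db2 : List (List (String × String))) (key1 : String) (key2 : String) : List (List (String × String)) :=
  db1.foldl (fun result d1 =>
    let st := db2.foldl (fun (st : List (List (String × String)) × Bool) d2 =>
      if pyGetKV d1 key1 = pyGetKV d2 key2 then (st.1 ++ [pyMerge d1 d2], true) else st)
      (result, false)
    if st.2 then st.1 else st.1 ++ [d1]) []

-- ===== PORT B =====
def joinLists_alt (db1 : List (List (String × String))) (db2 : List (List (String × String))) (key1 : String) (key2 : String) : List (List (String × String)) :=
  let index : PySem.Dict (Option String) (List (List (String × String))) :=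
    db2.foldl (fun idx d2 => idx.modify (pyGetKV d2 key2) [] (· ++ [d2])) PySem.Dict.empty
  db1.foldl (fun result d1 =>
    let ms := index.getD (pyGetKV d1 key1) []
    if ms = [] then result ++ [d1]
    else result ++ ms.map (fun d2 => pyMerge d1 d2)) []

-- ===== PRECONDITION & SPEC =====
def Spec_joinLists (db1 : List (List (String × String))) (db2 : List (List (String × String))) (key1 : String) (key2 : String) (out : List (List (String × String))) : Prop := out = joinLists_alt db1 db2 key1 key2
instance (db1 : List (List (String × String))) (db2 : List (List (String × String))) (key1 : String) (key2 : String) (out : List (List (String × String))) : Decidable (Spec_joinLists db1 db2 key1 key2 out) := by unfold Spec_joinLists; infer_instance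

-- ===== CLAIM (what is proved, stated in full; the proofs are below) =====
def Claim_equal_joinLists : Prop := ∀ (db1 : List (List (String × String))) (db2 : List (List (String × String))) (key1 : String) (key2 : String), Dom_joinLists db1 db2 key1 key2 → Spec_joinLists db1 db2 key1 key2 (joinLists db1 db2 key1 key2)

-- ===== LEMMAS AND PROOFS =====

-- B's grouped index, looked up at any key, yields db2 filtered to the rows with that join-key value.
theorem index_getD (db2 : List (List (String × String))) (key2 : String) (k : Option String) :
    (db2.foldl (fun idx d2 => idx.modify (pyGetKV d2 key2) [] (· ++ [d2]))
        (PySem.Dict.empty : PySem.Dict (Option String) (List (List (String × String))))).getD k []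
      = db2.filter (fun d2 => pyGetKV d2 key2 == k) := by
  have h :
      (db2.foldl (fun idx d2 => idx.modify (pyGetKV d2 key2) [] (· ++ [d2]))
        (PySem.Dict.empty : PySem.Dict (Option String) (List (List (String × String)))))
      = ((db2.map (fun d2 => (pyGetKV d2 key2, d2))).foldl
          (fun idx p => idx.modify p.1 [] (· ++ [p.2])) PySem.Dict.empty) := by
    rw [List.foldl_map]
  rw [h, PySem.Dict.getD_foldl_modify_append, PySem.Dict.getD_empty]
  simp [List.filter_map, Function.comp_def]

-- A's inner loop over db2, from any accumulator.
theorem innerA (d1 : List (String × String)) (key1 key2 : String)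
    (db2 : List (List (String × String))) (res : List (List (String × String))) (m : Bool) :
    db2.foldl (fun (st : List (List (String × String)) × Bool) d2 =>
        if pyGetKV d1 key1 = pyGetKV d2 key2 then (st.1 ++ [pyMerge d1 d2], true) else st)
      (res, m)
    = (res ++ (db2.filter (fun d2 => pyGetKV d2 key2 == pyGetKV d1 key1)).map (fun d2 => pyMerge d1 d2),
       m || db2.any (fun d2 => pyGetKV d2 key2 == pyGetKV d1 key1)) := by
  induction db2 generalizing res m with
  | nil => simp
  | cons d2 t ih =>
    by_cases h : pyGetKV d1 key1 = pyGetKV d2 key2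
    · have hb : (pyGetKV d2 key2 == pyGetKV d1 key1) = true := beq_iff_eq.mpr h.symm
      rw [List.foldl_cons, if_pos h, ih]
      simp [hb]
    · have hb : (pyGetKV d2 key2 == pyGetKV d1 key1) = false :=
        beq_eq_false_iff_ne.mpr (fun e => h e.symm)
      rw [List.foldl_cons, if_neg h, ih]
      simp [hb]

theorem main (db1 db2 : List (List (String × String))) (key1 key2 : String) :
    joinLists db1 db2 key1 key2 = joinLists_alt db1 db2 key1 key2 := by
  unfold joinLists joinLists_alt
  -- both outer folds append the same per-row chunk; induct on db1 with a common accumulator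
  suffices h : ∀ (res : List (List (String × String))),
      db1.foldl (fun result d1 =>
        let st := db2.foldl (fun (st : List (List (String × String)) × Bool) d2 =>
          if pyGetKV d1 key1 = pyGetKV d2 key2 then (st.1 ++ [pyMerge d1 d2], true) else st)
          (result, false)
        if st.2 then st.1 else st.1 ++ [d1]) res
      = db1.foldl (fun result d1 =>
        let ms := (db2.foldl (fun idx d2 => idx.modify (pyGetKV d2 key2) [] (· ++ [d2]))
            (PySem.Dict.empty : PySem.Dict (Option String) (List (List (String × String))))).getD (pyGetKV d1 key1) []
        if ms = [] then result ++ [d1]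
        else result ++ ms.map (fun d2 => pyMerge d1 d2)) res by
    exact h []
  intro res
  induction db1 generalizing res with
  | nil => rfl
  | cons d1 t ih =>
    simp only [List.foldl_cons]
    rw [innerA, index_getD]
    by_cases hm : db2.any (fun d2 => pyGetKV d2 key2 == pyGetKV d1 key1)
    · have hne : (db2.filter (fun d2 => pyGetKV d2 key2 == pyGetKV d1 key1)) ≠ [] := by
        simp only [ne_eq, List.filter_eq_nil_iff]
        simp only [List.any_eq_true] at hm
        obtain ⟨x, hx, hp⟩ := hm
        exact fun h => h x hx hp
      simp [hm, hne, ih]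
    · have he : (db2.filter (fun d2 => pyGetKV d2 key2 == pyGetKV d1 key1)) = [] := by
        rw [List.filter_eq_nil_iff]
        simp only [List.any_eq_true, not_exists, not_and] at hm
        intro x hx
        simpa using hm x hx
      simp [hm, he, ih]

-- ===== VERDICT (by name: the statement is the Claim_ definition above) =====
theorem joinLists_spec : Claim_equal_joinLists := by
  intro db1 db2 key1 key2 _
  exact main db1 db2 key1 key2
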